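-- pv_equiv track=rewrite | github.com/Veljko121/songbookpro-manager-set-automation | src/base_repertoire_repository.py | _process_song_data
-- ===== SOURCE A (Python) =====
-- from typing import List, Tuple
--
-- keys = {
--     "A"  :  0,
--     "B"  :  1,
--     "H"  :  2,
--     "C"  :  3,
--     "Db" :  4, "C#" :  4,
--     "D"  :  5,
--     "Eb" :  6, "D#" :  6,
--     "E"  :  7,
--     "F"  :  8,
--     "F#" :  9, "Gb" :  9,
--     "G"  : 10,
--     "Ab" : 11, "G#" : 11,
--     "F#m": 12, "Gbm": 12,
--     "Gm" : 13,
--     "G#m": 14, "Abm": 14,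
--     "Am" : 15,
--     "Bm" : 16,
--     "Hm" : 17,
--     "Cm" : 18,
--     "C#m": 19, "Dbm": 19,
--     "Dm" : 20,
--     "D#m": 21, "Ebm": 21,
--     "Em" : 22,
--     "Fm" : 23,
--
--     "None" : -1,
-- }
--
-- def format_song_name(name: str):
--     return name.strip().replace("‘", "'").replace("’", "'")
--
-- def _process_song_data(song_names: List[str], song_keys: List[str], notes: List[str]) -> List[Tuple[str, int, str]]:
--     enumerated_rows = {}
--     for i, row in enumerate(zip(song_names, song_keys, notes)):
--         if row[0]:
--             enumerated_rows[i] = row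
--
--     row_ids_with_error = []
--     for id, row in enumerated_rows.items():
--         try:
--             keys[row[1]]
--         except KeyError:
--             row_ids_with_error.append(id)
--
--     if len(row_ids_with_error) > 0:
--         raise ValueError(f"Key errors in rows: {[row + 1 for row in row_ids_with_error]}.")
--
--     songs = []
--     for _, row in enumerated_rows.items():
--         song_name = format_song_name(row[0])
--         key = row[1].strip()
--         note = row[2]
--         songs.append((song_name, keys[key], note))
--
--     return songs
-- ===== SOURCE B (Python) =====
-- from typing import List, Tuple
--
-- keys = {
--     "A"  :  0,
--     "B"  :  1,
--     "H"  :  2,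
--     "C"  :  3,
--     "Db" :  4, "C#" :  4,
--     "D"  :  5,
--     "Eb" :  6, "D#" :  6,
--     "E"  :  7,
--     "F"  :  8,
--     "F#" :  9, "Gb" :  9,
--     "G"  : 10,
--     "Ab" : 11, "G#" : 11,
--     "F#m": 12, "Gbm": 12,
--     "Gm" : 13,
--     "G#m": 14, "Abm": 14,
--     "Am" : 15,
--     "Bm" : 16,
--     "Hm" : 17,
--     "Cm" : 18,
--     "C#m": 19, "Dbm": 19,
--     "Dm" : 20,
--     "D#m": 21, "Ebm": 21,
--     "Em" : 22,
--     "Fm" : 23,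
--
--     "None" : -1,
-- }
--
-- def format_song_name(name: str):
--     return name.strip().replace("\u2018", "'").replace("\u2019", "'")
--
-- def _process_song_data(song_names: List[str], song_keys: List[str], notes: List[str]) -> List[Tuple[str, int, str]]:
--     errors = []
--     songs = []
--     for i, (name, key, note) in enumerate(zip(song_names, song_keys, notes)):
--         if not name:
--             continue
--         if key not in keys:
--             errors.append(i)
--         else:
--             songs.append((format_song_name(name), keys[key.strip()], note))
--     if errors:
--         raise ValueError(f"Key errors in rows: {[r + 1 for r in errors]}.")
--     return songs
-- ===== Notes on version B (the rewrite author's own statement) =====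
-- stated objective: simpler
-- what changed: B replaces A's three passes and the intermediate index-keyed dict by one pass over enumerate(zip(...)) that collects error indices and result tuples simultaneously, raising afterwards if any errors were found.
import Mathlib
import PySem

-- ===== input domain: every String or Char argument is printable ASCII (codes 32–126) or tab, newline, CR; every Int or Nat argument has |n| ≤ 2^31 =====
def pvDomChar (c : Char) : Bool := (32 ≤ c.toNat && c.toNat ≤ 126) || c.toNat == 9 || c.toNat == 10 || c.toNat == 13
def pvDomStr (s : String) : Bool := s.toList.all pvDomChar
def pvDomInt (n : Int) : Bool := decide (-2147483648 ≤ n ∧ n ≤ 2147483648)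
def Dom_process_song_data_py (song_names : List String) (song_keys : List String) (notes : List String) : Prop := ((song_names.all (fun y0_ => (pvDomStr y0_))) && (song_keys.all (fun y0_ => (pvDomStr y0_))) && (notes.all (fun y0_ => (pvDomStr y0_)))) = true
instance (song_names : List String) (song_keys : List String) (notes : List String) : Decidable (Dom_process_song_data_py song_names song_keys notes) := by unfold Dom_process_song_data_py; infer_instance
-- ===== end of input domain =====

-- B fuses A's three passes (dict build, validation pass, output pass) into ONE pass over
-- enumerate(zip(...)) with no intermediate dict; same return value on every non-raising input.

-- the module-level `keys` dict, shared by both sources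
def pvKeysDict : PySem.Dict String Int := PySem.Dict.ofList
  [("A", 0), ("B", 1), ("H", 2), ("C", 3), ("Db", 4), ("C#", 4), ("D", 5),
   ("Eb", 6), ("D#", 6), ("E", 7), ("F", 8), ("F#", 9), ("Gb", 9), ("G", 10),
   ("Ab", 11), ("G#", 11), ("F#m", 12), ("Gbm", 12), ("Gm", 13), ("G#m", 14),
   ("Abm", 14), ("Am", 15), ("Bm", 16), ("Hm", 17), ("Cm", 18), ("C#m", 19),
   ("Dbm", 19), ("Dm", 20), ("D#m", 21), ("Ebm", 21), ("Em", 22), ("Fm", 23),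
   ("None", -1)]

-- format_song_name (shared helper; the two replaced quote characters are non-ASCII)
def pvFmt (name : String) : String :=
  PySem.Str.replace (PySem.Str.replace (PySem.Str.strip name) "‘" "'") "’" "'"

-- ===== PORT A =====
-- raise branch (ValueError when some kept row's key is unknown) is excluded by Pre_; the port returns [] there
def process_song_data_py (song_names : List String) (song_keys : List String) (notes : List String) : List (String × Int × String) :=
  let rows := PySem.List.enumerate (song_names.zip (song_keys.zip notes)) 0
  let enumeratedRows := rows.foldl
    (fun d p => if p.2.1 ≠ "" then d.insert p.1 p.2 else d) PySem.Dict.empty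
  let rowIdsWithError := enumeratedRows.items.foldl
    (fun acc q => if (pvKeysDict.get? q.2.2.1).isNone then acc ++ [q.1] else acc) []
  if rowIdsWithError.length > 0 then []
  else enumeratedRows.items.foldl
    (fun songs q => songs ++ [(pvFmt q.2.1, pvKeysDict.getD (PySem.Str.strip q.2.2.1) 0, q.2.2.2)]) []

-- ===== PORT B =====
-- one pass collecting (error ids, songs); raise branch (errors nonempty) excluded by Pre_, port returns []
def process_song_data_py_alt (song_names : List String) (song_keys : List String) (notes : List String) : List (String × Int × String) :=
  let st := (PySem.List.enumerate (song_names.zip (song_keys.zip notes)) 0).foldl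
    (fun (st : List Int × List (String × Int × String)) p =>
      if p.2.1 = "" then st
      else if pvKeysDict.contains p.2.2.1 = false then (st.1 ++ [p.1], st.2)
      else (st.1, st.2 ++ [(pvFmt p.2.1, pvKeysDict.getD (PySem.Str.strip p.2.2.1) 0, p.2.2.2)]))
    ([], [])
  if st.1 ≠ [] then [] else st.2

-- ===== PRECONDITION & SPEC =====
def pvValidKeys : List String :=
  ["A", "B", "H", "C", "Db", "C#", "D", "Eb", "D#", "E", "F", "F#", "Gb", "G",
   "Ab", "G#", "F#m", "Gbm", "Gm", "G#m", "Abm", "Am", "Bm", "Hm", "Cm", "C#m",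
   "Dbm", "Dm", "D#m", "Ebm", "Em", "Fm", "None"]

-- Pre_ excludes exactly the inputs where A raises ValueError (some row with a nonempty name has a key not in `keys`); B raises the same ValueError there.
def Pre_process_song_data_py (song_names : List String) (song_keys : List String) (notes : List String) : Prop :=
  ∀ r ∈ song_names.zip (song_keys.zip notes), r.1 ≠ "" → r.2.1 ∈ pvValidKeys
instance (song_names : List String) (song_keys : List String) (notes : List String) : Decidable (Pre_process_song_data_py song_names song_keys notes) := by unfold Pre_process_song_data_py; infer_instance

def pvWitness_process_song_data_py : List String × List String × List String :=
  (["My Song", "", "Other"], ["A", "zz", "F#m"], ["note1", "note2", "note3"])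

def Spec_process_song_data_py (song_names : List String) (song_keys : List String) (notes : List String) (out : List (String × Int × String)) : Prop := out = process_song_data_py_alt song_names song_keys notes
instance (song_names : List String) (song_keys : List String) (notes : List String) (out : List (String × Int × String)) : Decidable (Spec_process_song_data_py song_names song_keys notes out) := by unfold Spec_process_song_data_py; infer_instance

-- ===== CLAIM (what is proved, stated in full; the proofs are below) =====
def Claim_equal_process_song_data_py : Prop := ∀ (song_names : List String) (song_keys : List String) (notes : List String), Dom_process_song_data_py song_names song_keys notes → Pre_process_song_data_py song_names song_keys notes → Spec_process_song_data_py song_names song_keys notes (process_song_data_py song_names song_keys notes)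

-- ===== LEMMAS AND PROOFS =====

-- every valid key is present in the dict (finite check)
theorem pv_valid_key_found : ∀ k ∈ pvValidKeys,
    (pvKeysDict.get? k).isSome = true ∧ pvKeysDict.contains k = true := by decide

-- the kept rows of the enumerated input
def pvKept (xs : List (String × String × String)) : List (Int × String × String × String) :=
  (PySem.List.enumerate xs 0).filter (fun p => p.2.1 != "")

theorem pv_kept_nodup_fst (xs : List (String × String × String)) :
    ((pvKept xs).map Prod.fst).Nodup := by
  have h := (PySem.List.pairwise_lt_enumerate xs 0).filter (fun p => p.2.1 != "")
  exact ((List.pairwise_map).2 h).imp ne_of_lt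

-- A's dict of kept rows has exactly the kept rows as items
theorem pv_items_eq (xs : List (String × String × String)) :
    ((PySem.List.enumerate xs 0).foldl
      (fun d p => if p.2.1 ≠ "" then d.insert p.1 p.2 else d) PySem.Dict.empty).items
    = pvKept xs := by
  have h1 : (PySem.List.enumerate xs 0).foldl
      (fun d p => if p.2.1 ≠ "" then d.insert p.1 p.2 else d) PySem.Dict.empty
      = (pvKept xs).foldl (fun d p => d.insert p.1 p.2) PySem.Dict.empty := by
    rw [pvKept, List.foldl_filter]
    congr 1
    funext d p
    by_cases h : p.2.1 = "" <;> simp [h]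
  rw [h1]
  have h2 := PySem.Dict.items_foldl_insert_fresh (l := pvKept xs) (k := Prod.fst)
    (v := Prod.snd) (d := PySem.Dict.empty)
    (by intro a _; exact PySem.Dict.contains_empty _) (pv_kept_nodup_fst xs)
  simpa using h2

-- under Pre_, the error pass collects nothing
theorem pv_errors_nil (l : List (Int × String × String × String)) (acc : List Int)
    (h : ∀ q ∈ l, (pvKeysDict.get? q.2.2.1).isSome = true) :
    l.foldl (fun acc q => if (pvKeysDict.get? q.2.2.1).isNone then acc ++ [q.1] else acc) acc
    = acc := by
  induction l generalizing acc with
  | nil => rfl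
  | cons q t ih =>
    have hq := h q (List.mem_cons_self ..)
    rw [List.foldl_cons, if_neg (by simp only [Option.isNone_iff_eq_none]; exact Option.ne_none_iff_isSome.mpr hq)]
    exact ih acc (fun r hr => h r (List.mem_cons_of_mem _ hr))

-- B's single pass, under Pre_, accumulates no errors and maps the kept rows
theorem pv_b_fold (xs : List (String × String × String)) (s : Int)
    (errs : List Int) (res : List (String × Int × String))
    (h : ∀ r ∈ xs, r.1 ≠ "" → pvKeysDict.contains r.2.1 = true) :
    (PySem.List.enumerate xs s).foldl
      (fun (st : List Int × List (String × Int × String)) p =>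
        if p.2.1 = "" then st
        else if pvKeysDict.contains p.2.2.1 = false then (st.1 ++ [p.1], st.2)
        else (st.1, st.2 ++ [(pvFmt p.2.1, pvKeysDict.getD (PySem.Str.strip p.2.2.1) 0, p.2.2.2)]))
      (errs, res)
    = (errs, res ++ ((PySem.List.enumerate xs s).filter (fun p => p.2.1 != "")).map
        (fun q => (pvFmt q.2.1, pvKeysDict.getD (PySem.Str.strip q.2.2.1) 0, q.2.2.2))) := by
  induction xs generalizing s errs res with
  | nil => simp [PySem.List.enumerate_nil]
  | cons r t ih =>
    rw [PySem.List.enumerate_cons]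
    by_cases hn : r.1 = ""
    · simp only [List.foldl_cons, List.filter_cons]
      rw [if_pos (by simp [hn]), if_neg (by simp [hn])]
      exact ih (s + 1) errs res (fun x hx => h x (List.mem_cons_of_mem _ hx))
    · have hc := h r (List.mem_cons_self ..) hn
      simp only [List.foldl_cons, List.filter_cons]
      rw [if_neg (by simp [hn]), if_neg (by simp [hc]), if_pos (by simp [hn])]
      rw [ih (s + 1) errs _ (fun x hx => h x (List.mem_cons_of_mem _ hx))]
      simp

-- kept rows come from the input list
theorem pv_mem_kept (xs : List (String × String × String)) (q : Int × String × String × String)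
    (hq : q ∈ pvKept xs) : q.2 ∈ xs ∧ q.2.1 ≠ "" := by
  rw [pvKept, List.mem_filter] at hq
  obtain ⟨hmem, hne⟩ := hq
  rw [PySem.List.mem_enumerate_iff] at hmem
  obtain ⟨k, hk, rfl⟩ := hmem
  exact ⟨List.getElem_mem hk, by simpa using hne⟩

-- ===== VERDICT (by name: the statement is the Claim_ definition above) =====
theorem process_song_data_py_spec : Claim_equal_process_song_data_py := by
  intro song_names song_keys notes _ hpre
  unfold Spec_process_song_data_py process_song_data_py process_song_data_py_alt
  set xs := song_names.zip (song_keys.zip notes) with hxs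
  have hkept : ∀ q ∈ pvKept xs, q.2.2.1 ∈ pvValidKeys := by
    intro q hq
    obtain ⟨hmem, hne⟩ := pv_mem_kept xs q hq
    exact hpre q.2 hmem hne
  simp only
  rw [pv_items_eq xs, pv_errors_nil _ _
    (fun q hq => (pv_valid_key_found _ (hkept q hq)).1)]
  rw [pv_b_fold xs 0 [] []
    (fun r hr hne => (pv_valid_key_found _ (hpre r hr hne)).2)]
  simp only [pvKept]
  rw [PySem.List.foldl_append_singleton_eq_map]
  simp
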